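-- pv_equiv track=rewrite | github.com/Ssomar-Developement/Wiki | fix-final.py | fix_escaped_asterisks
-- ===== SOURCE A (Python) =====
-- def fix_escaped_asterisks(content):
--     """Fix escaped asterisks that cause MDX issues"""
--     # In regular text (not in code blocks), \* should just be *
--     # But we need to be careful not to change them in code blocks
--
--     lines = content.split('\n')
--     fixed_lines = []
--     in_code_block = False
--     in_admonition = False
--
--     for line in lines:
--         # Track code blocks
--         if line.strip().startswith('```'):
--             in_code_block = not in_code_block
--             fixed_lines.append(line)
--             continue
--
--         # Track admonitions
--         if line.strip().startswith(':::'):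
--             in_admonition = not in_admonition
--             fixed_lines.append(line)
--             continue
--
--         # Don't modify code blocks
--         if in_code_block:
--             fixed_lines.append(line)
--             continue
--
--         # Fix escaped asterisks in regular text and admonitions
--         # Replace \* with just * when not in inline code
--         if '\\*' in line and '`' not in line:
--             line = line.replace('\\*', '*')
--         elif '\\*' in line:
--             # Complex case: has both inline code and escaped asterisks
--             # Split by inline code and fix only text parts
--             parts = []
--             in_inline = False
--             current = ''
--             for char in line:
--                 if char == '`':
--                     if in_inline:
--                         parts.append(('code', current + '`'))
--                         current = ''
--                     else:
--                         if current:
--                             parts.append(('text', current))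
--                         current = '`'
--                     in_inline = not in_inline
--                 else:
--                     current += char
--
--             if current:
--                 parts.append(('code' if in_inline else 'text', current))
--
--             # Fix escaped asterisks in text parts
--             result = []
--             for part_type, part_text in parts:
--                 if part_type == 'text':
--                     part_text = part_text.replace('\\*', '*')
--                 result.append(part_text)
--             line = ''.join(result)
--
--         fixed_lines.append(line)
--
--     return '\n'.join(fixed_lines)
-- ===== SOURCE B (Python) =====
-- def fix_escaped_asterisks(content):
--     """Fix escaped asterisks that cause MDX issues"""
--     out = []
--     in_code_block = False
--     for line in content.split('\n'):
--         stripped = line.strip()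
--         if stripped.startswith('```'):
--             in_code_block = not in_code_block
--             out.append(line)
--         elif in_code_block or stripped.startswith(':::'):
--             out.append(line)
--         else:
--             # even-indexed backtick segments are outside inline code
--             segs = line.split('`')
--             out.append('`'.join(seg.replace('\\*', '*') if i % 2 == 0 else seg
--                                 for i, seg in enumerate(segs)))
--     return '\n'.join(out)
-- ===== Notes on version B (the rewrite author's own statement) =====
-- stated objective: simpler
-- what changed: The char-by-char inline-code span parser (tagged code/text parts list plus an in_inline flag and a current buffer) is replaced by splitting the line on the backtick character and unescaping escaped asterisks only in even-indexed (outside-inline-code) segments, applied uniformly to every non-code-block line so A's three replacement branches collapse into one expression.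
import Mathlib
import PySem

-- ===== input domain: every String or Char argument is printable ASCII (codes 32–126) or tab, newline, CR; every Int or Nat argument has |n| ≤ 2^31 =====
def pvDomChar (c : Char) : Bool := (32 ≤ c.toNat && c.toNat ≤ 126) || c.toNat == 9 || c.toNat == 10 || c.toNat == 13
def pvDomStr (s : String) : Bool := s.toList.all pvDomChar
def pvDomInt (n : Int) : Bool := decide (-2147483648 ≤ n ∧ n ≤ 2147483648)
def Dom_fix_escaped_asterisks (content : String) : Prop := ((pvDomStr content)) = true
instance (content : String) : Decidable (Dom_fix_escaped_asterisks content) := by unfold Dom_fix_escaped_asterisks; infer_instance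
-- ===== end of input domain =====

-- B replaces A's per-character inline-code span parser (tagged parts + in_inline flag) by
-- splitting the line on '`' and unescaping only even-indexed segments; objective: simpler.

-- ===== PORT A =====
-- inner character loop of A's "complex case"
def pvA_char_step (st : List (String × List Char) × Bool × List Char) (ch : Char) :
    List (String × List Char) × Bool × List Char :=
  if ch = '`' then
    if st.2.1 then (st.1 ++ [("code", st.2.2 ++ ['`'])], false, [])
    else ((if st.2.2 ≠ [] then st.1 ++ [("text", st.2.2)] else st.1), true, ['`'])
  else (st.1, st.2.1, st.2.2 ++ [ch])

-- trailing part + per-part replacement + ''.join, after the character loop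
def pvA_finish (st : List (String × List Char) × Bool × List Char) : List Char :=
  let parts := if st.2.2 ≠ [] then st.1 ++ [((if st.2.1 then "code" else "text"), st.2.2)] else st.1
  let result := parts.foldl
    (fun acc p => acc ++ [if p.1 = "text" then PySem.Chars.replace p.2 ['\\', '*'] ['*'] else p.2]) []
  PySem.Chars.join [] result

def pvA_fix_line (line : List Char) : List Char :=
  if PySem.Chars.isIn ['\\', '*'] line && !(PySem.Chars.isIn ['`'] line) then
    PySem.Chars.replace line ['\\', '*'] ['*']
  else if PySem.Chars.isIn ['\\', '*'] line then
    pvA_finish (List.foldl pvA_char_step ([], false, []) line)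
  else line

def pvA_line_step (st : List (List Char) × Bool × Bool) (line : List Char) :
    List (List Char) × Bool × Bool :=
  if PySem.Chars.startswith (PySem.Chars.strip line) ['`', '`', '`'] then
    (st.1 ++ [line], !st.2.1, st.2.2)
  else if PySem.Chars.startswith (PySem.Chars.strip line) [':', ':', ':'] then
    (st.1 ++ [line], st.2.1, !st.2.2)
  else if st.2.1 then (st.1 ++ [line], st.2.1, st.2.2)
  else (st.1 ++ [pvA_fix_line line], st.2.1, st.2.2)

def fix_escaped_asterisks (content : String) : String :=
  String.ofList (PySem.Chars.join ['\n']
    ((PySem.Chars.splitOn content.toList ['\n']).foldl pvA_line_step ([], false, false)).1)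

-- ===== PORT B =====
def pvB_seg (p : Int × List Char) : List Char :=
  if PySem.Int.mod p.1 2 = 0 then PySem.Chars.replace p.2 ['\\', '*'] ['*'] else p.2

def pvB_fix_line (line : List Char) : List Char :=
  PySem.Chars.join ['`'] ((PySem.List.enumerate (PySem.Chars.splitOn line ['`'])).map pvB_seg)

def pvB_line_step (st : List (List Char) × Bool) (line : List Char) : List (List Char) × Bool :=
  let stripped := PySem.Chars.strip line
  if PySem.Chars.startswith stripped ['`', '`', '`'] then (st.1 ++ [line], !st.2)
  else if st.2 || PySem.Chars.startswith stripped [':', ':', ':'] then (st.1 ++ [line], st.2)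
  else (st.1 ++ [pvB_fix_line line], st.2)

def fix_escaped_asterisks_alt (content : String) : String :=
  String.ofList (PySem.Chars.join ['\n']
    ((PySem.Chars.splitOn content.toList ['\n']).foldl pvB_line_step ([], false)).1)

-- ===== PRECONDITION & SPEC =====
def Spec_fix_escaped_asterisks (content : String) (out : String) : Prop := out = fix_escaped_asterisks_alt content
instance (content : String) (out : String) : Decidable (Spec_fix_escaped_asterisks content out) := by unfold Spec_fix_escaped_asterisks; infer_instance

-- ===== CLAIM (what is proved, stated in full; the proofs are below) =====
def Claim_equal_fix_escaped_asterisks : Prop := ∀ (content : String), Dom_fix_escaped_asterisks content → Spec_fix_escaped_asterisks content (fix_escaped_asterisks content)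

-- ===== LEMMAS AND PROOFS =====

-- proof-side structural versions of replace '\*'→'*' and split-on-'`'
def pvRep : List Char → List Char
  | [] => []
  | c :: t => if c = '\\' ∧ t.head? = some '*' then '*' :: pvRep t.tail else c :: pvRep t
  termination_by l => l.length
  decreasing_by
    · simp only [List.length_tail, List.length_cons]; omega
    · simp

def pvSplH : List Char → List Char
  | [] => []
  | c :: t => if c = '`' then [] else c :: pvSplH t

def pvSplT : List Char → List (List Char)
  | [] => []
  | c :: t => if c = '`' then pvSplH t :: pvSplT t else pvSplT t

def pvAlt : Bool → List (List Char) → List (List Char)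
  | _, [] => []
  | b, s :: ss => (if b then pvRep s else s) :: pvAlt (!b) ss

def pvK (b : Bool) (ss : List (List Char)) : List Char := PySem.Chars.join ['`'] (pvAlt b ss)

def pvRender (parts : List (String × List Char)) : List Char :=
  (parts.map (fun p => if p.1 = "text" then pvRep p.2 else p.2)).flatten

theorem pv_replace_go_eq : ∀ (fuel : Nat) (l acc : List Char), l.length ≤ fuel →
    PySem.Chars.replace.go ['\\', '*'] ['*'] fuel l acc = acc.reverse ++ pvRep l := by
  intro fuel
  induction fuel with
  | zero =>
    intro l acc h
    have : l = [] := List.length_eq_zero_iff.mp (Nat.le_zero.mp h)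
    subst this
    rw [PySem.Chars.replace.go]; simp [pvRep]
  | succ f ih =>
    intro l acc h
    cases l with
    | nil => rw [PySem.Chars.replace.go]; simp [pvRep]; omega
    | cons c t =>
      rw [PySem.Chars.replace.go]
      by_cases hp0 : ['\\', '*'] <+: (c :: t)
      · obtain ⟨r, hr⟩ := hp0
        simp only [List.cons_append, List.nil_append] at hr
        injection hr with h1 h2
        subst h1; subst h2
        have hpre : List.isPrefixOf ['\\', '*'] ('\\' :: '*' :: r) = true := by
          simp [List.isPrefixOf_iff_prefix]
        simp only [hpre, if_pos, List.length_cons, List.drop_succ_cons, List.drop_zero,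
          List.length_nil, List.reverse_cons, List.reverse_nil, List.nil_append, List.singleton_append]
        rw [ih r ('*' :: acc) (by simp at h ⊢; omega)]
        rw [pvRep]
        simp
      · have hpre : List.isPrefixOf ['\\', '*'] (c :: t) = false := by
          simp only [Bool.eq_false_iff, ne_eq, List.isPrefixOf_iff_prefix]
          exact hp0
        simp only [hpre, Bool.false_eq_true, if_neg, reduceCtorEq]
        rw [ih t (c :: acc) (by simp at h ⊢; omega)]
        have hcond : ¬ (c = '\\' ∧ t.head? = some '*') := by
          intro ⟨h1, h2⟩
          apply hp0
          cases t with
          | nil => simp at h2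
          | cons d r => simp at h2; subst h1; subst h2; exact ⟨r, rfl⟩
        rw [pvRep]
        simp [hcond]

theorem pv_replace_eq (l : List Char) :
    PySem.Chars.replace l ['\\', '*'] ['*'] = pvRep l := by
  rw [PySem.Chars.replace]
  simpa using pv_replace_go_eq l.length l [] le_rfl

theorem pv_splitOn_go_eq : ∀ (fuel : Nat) (l cur : List Char) (acc : List (List Char)),
    l.length < fuel →
    PySem.Chars.splitOn.go ['`'] fuel l cur acc
      = acc.reverse ++ ((cur.reverse ++ pvSplH l) :: pvSplT l) := by
  intro fuel
  induction fuel with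
  | zero => intro l cur acc h; omega
  | succ f ih =>
    intro l cur acc h
    cases l with
    | nil => rw [PySem.Chars.splitOn.go]; simp [pvSplH, pvSplT]; omega
    | cons c t =>
      rw [PySem.Chars.splitOn.go]
      by_cases hc : c = '`'
      · subst hc
        have hpre : List.isPrefixOf ['`'] ('`' :: t) = true := by
          simp [List.isPrefixOf_iff_prefix]
        simp only [hpre, if_pos, List.length_cons, List.length_nil, List.drop_succ_cons,
          List.drop_zero]
        rw [ih t [] _ (by simp at h ⊢; omega)]
        rw [pvSplH, pvSplT]
        simp
      · have hpre : List.isPrefixOf ['`'] (c :: t) = false := by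
          rw [Bool.eq_false_iff]
          intro hp
          rw [List.isPrefixOf_iff_prefix, List.cons_prefix_cons] at hp
          exact hc hp.1.symm
        simp only [hpre, Bool.false_eq_true, if_neg, reduceCtorEq]
        rw [ih t (c :: cur) acc (by simp at h ⊢; omega)]
        rw [pvSplH, pvSplT]
        simp [hc]

theorem pv_splitOn_tick (l : List Char) :
    PySem.Chars.splitOn l ['`'] = pvSplH l :: pvSplT l := by
  rw [PySem.Chars.splitOn]
  simpa using pv_splitOn_go_eq (l.length + 1) l [] [] (by omega)

theorem pv_join_nil_flatten (ss : List (List Char)) : PySem.Chars.join [] ss = ss.flatten := by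
  simp only [PySem.Chars.join, List.intercalate]
  induction ss with
  | nil => rfl
  | cons s t ih =>
    cases t with
    | nil => simp
    | cons s2 t2 => simpa using ih

theorem pv_join_cons_head (c : Char) (x : List Char) (ss : List (List Char)) :
    PySem.Chars.join ['`'] ((c :: x) :: ss) = c :: PySem.Chars.join ['`'] (x :: ss) := by
  cases ss with
  | nil => simp [PySem.Chars.join_singleton]
  | cons s2 t => simp [PySem.Chars.join_cons_cons]

theorem pv_join_spl (l : List Char) :
    PySem.Chars.join ['`'] (pvSplH l :: pvSplT l) = l := by
  induction l with
  | nil => simp [pvSplH, pvSplT, PySem.Chars.join_singleton]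
  | cons c t ih =>
    by_cases hc : c = '`'
    · subst hc
      rw [pvSplH, pvSplT]
      simp only [if_pos rfl, reduceIte]
      rw [PySem.Chars.join_cons_cons]
      simpa using ih
    · rw [pvSplH, pvSplT]
      simp only [if_neg hc]
      rw [pv_join_cons_head, ih]

theorem pvK_singleton (b : Bool) (s : List Char) : pvK b [s] = if b then pvRep s else s := by
  simp [pvK, pvAlt, PySem.Chars.join_singleton]

theorem pvK_cons_cons (b : Bool) (s s2 : List Char) (ss : List (List Char)) :
    pvK b (s :: s2 :: ss) = (if b then pvRep s else s) ++ '`' :: pvK (!b) (s2 :: ss) := by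
  simp [pvK, pvAlt, PySem.Chars.join_cons_cons]

theorem pv_finish_eq (parts : List (String × List Char)) (inl : Bool) (cur : List Char) :
    pvA_finish (parts, inl, cur) = pvRender parts ++ (if inl then cur else pvRep cur) := by
  unfold pvA_finish
  dsimp only
  rw [PySem.List.foldl_append_singleton_eq_map
    (fun p : String × List Char => if p.1 = "text" then PySem.Chars.replace p.2 ['\\', '*'] ['*'] else p.2)]
  rw [List.nil_append, pv_join_nil_flatten]
  by_cases hcur : cur = [] <;> cases inl <;>
    simp [pvRender, pv_replace_eq, hcur, pvRep]

theorem pv_render_append (parts : List (String × List Char)) (tag : String) (x : List Char) :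
    pvRender (parts ++ [(tag, x)]) = pvRender parts ++ (if tag = "text" then pvRep x else x) := by
  simp [pvRender]

theorem pv_render_flush (parts : List (String × List Char)) (cur : List Char) :
    pvRender (if cur ≠ [] then parts ++ [("text", cur)] else parts)
      = pvRender parts ++ pvRep cur := by
  by_cases hcur : cur = [] <;> simp [hcur, pv_render_append, pvRep]

theorem pvK_false_cons_head (c : Char) (x : List Char) (ss : List (List Char)) :
    pvK false ((c :: x) :: ss) = c :: pvK false (x :: ss) := by
  simp only [pvK, pvAlt, Bool.not_false]
  exact pv_join_cons_head c x (pvAlt true ss)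

theorem pvK_true_cons (s s2 : List Char) (ss : List (List Char)) :
    pvK true (s :: s2 :: ss) = pvRep s ++ '`' :: pvK false (s2 :: ss) := by
  rw [pvK_cons_cons]; simp

theorem pvK_false_cons (s s2 : List Char) (ss : List (List Char)) :
    pvK false (s :: s2 :: ss) = s ++ '`' :: pvK true (s2 :: ss) := by
  rw [pvK_cons_cons]; simp

theorem pv_L1 : ∀ (l : List Char) (parts : List (String × List Char)) (inl : Bool) (cur : List Char),
    pvA_finish (List.foldl pvA_char_step (parts, inl, cur) l)
      = pvRender parts ++ (if inl then cur ++ pvK false (pvSplH l :: pvSplT l)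
                           else pvK true ((cur ++ pvSplH l) :: pvSplT l)) := by
  intro l
  induction l with
  | nil =>
    intro parts inl cur
    cases inl <;>
      simp [List.foldl_nil, pv_finish_eq, pvSplH, pvSplT, pvK_singleton, pvK, pvAlt,
        PySem.Chars.join_singleton]
  | cons c t ih =>
    intro parts inl cur
    rw [List.foldl_cons]
    by_cases hc : c = '`'
    · subst hc
      cases inl
      · -- text mode, flush current as a text part
        rw [show pvA_char_step (parts, false, cur) '`'
              = ((if cur ≠ [] then parts ++ [("text", cur)] else parts), true, ['`']) from by
            simp [pvA_char_step]]
        rw [ih, pv_render_flush, pvSplH, pvSplT]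
        simp only [if_pos rfl, reduceIte, List.append_nil, if_true, Bool.true_eq_false,
          if_false]
        rw [pvK_true_cons]
        simp [List.append_assoc]
      · -- inline mode, close the code part
        rw [show pvA_char_step (parts, true, cur) '`'
              = (parts ++ [("code", cur ++ ['`'])], false, []) from by simp [pvA_char_step]]
        rw [ih, pv_render_append, pvSplH, pvSplT]
        simp only [if_pos rfl, reduceIte, List.nil_append]
        rw [pvK_false_cons]
        simp [List.append_assoc]
    · rw [show pvA_char_step (parts, inl, cur) c = (parts, inl, cur ++ [c]) from by
          simp [pvA_char_step, hc]]
      rw [ih, pvSplH, pvSplT]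
      simp only [if_neg hc]
      cases inl
      · simp [List.append_assoc]
      · simp only [if_true, Bool.true_eq_false, reduceIte, pvK_false_cons_head]
        simp [List.append_assoc]

theorem pv_enum_map : ∀ (ss : List (List Char)) (n : Nat),
    (PySem.List.enumerate ss (n : Int)).map pvB_seg = pvAlt (decide (n % 2 = 0)) ss := by
  intro ss
  induction ss with
  | nil => intro n; simp [pvAlt]
  | cons s t ih =>
    intro n
    rw [PySem.List.enumerate_cons, List.map_cons]
    have hmod : PySem.Int.mod (n : Int) 2 = ((n % 2 : Nat) : Int) := by
      exact_mod_cast PySem.Int.mod_natCast n 2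
    have hstep : ((n : Int) + 1) = ((n + 1 : Nat) : Int) := by push_cast; ring
    rw [hstep, ih (n + 1)]
    have hpar : decide ((n + 1) % 2 = 0) = !decide (n % 2 = 0) := by
      rcases Nat.mod_two_eq_zero_or_one n with hn | hn <;> simp [Nat.add_mod, hn]
    rw [hpar, pvAlt,
      show pvB_seg ((n : Int), s)
          = if n % 2 = 0 then PySem.Chars.replace s ['\\', '*'] ['*'] else s from by
        simp only [pvB_seg, hmod, Nat.cast_eq_zero]]
    by_cases hn : n % 2 = 0 <;> simp [hn, pv_replace_eq]

theorem pvB_fix_line_eq (l : List Char) :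
    pvB_fix_line l = pvK true (pvSplH l :: pvSplT l) := by
  rw [pvB_fix_line, pv_splitOn_tick]
  rw [show (0 : Int) = ((0 : Nat) : Int) from rfl, pv_enum_map]
  simp [pvK]

theorem pv_rep_self (l : List Char) (h : ¬ ['\\', '*'] <:+: l) : pvRep l = l := by
  induction l using pvRep.induct with
  | case1 => simp [pvRep]
  | case2 c t hcond ih =>
    exfalso
    obtain ⟨hc, ht⟩ := hcond
    cases t with
    | nil => simp at ht
    | cons d r =>
      simp only [List.head?_cons, Option.some.injEq] at ht
      exact h (List.IsPrefix.isInfix ⟨r, by simp [hc, ht]⟩)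
  | case3 c t hcond ih =>
    rw [pvRep, if_neg hcond]
    rw [ih (fun h' => h (h'.trans (List.suffix_cons c t).isInfix))]

theorem pv_splH_prefix (l : List Char) : pvSplH l <+: l := by
  induction l with
  | nil => simp [pvSplH]
  | cons c t ih =>
    rw [pvSplH]
    by_cases hc : c = '`'
    · simp [hc]
    · simp only [if_neg hc]
      exact List.cons_prefix_cons.mpr ⟨rfl, ih⟩

theorem pv_splT_infix (l : List Char) : ∀ s ∈ pvSplT l, s <:+: l := by
  induction l with
  | nil => simp [pvSplT]
  | cons c t ih =>
    intro s hs
    rw [pvSplT] at hs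
    by_cases hc : c = '`'
    · rw [if_pos hc] at hs
      rcases List.mem_cons.mp hs with h1 | h1
      · exact h1 ▸ (pv_splH_prefix t).isInfix.trans (List.suffix_cons c t).isInfix
      · exact (ih s h1).trans (List.suffix_cons c t).isInfix
    · rw [if_neg hc] at hs
      exact (ih s hs).trans (List.suffix_cons c t).isInfix

theorem pv_alt_self (b : Bool) (ss : List (List Char))
    (h : ∀ s ∈ ss, ¬ ['\\', '*'] <:+: s) : pvAlt b ss = ss := by
  induction ss generalizing b with
  | nil => rfl
  | cons s t ih =>
    rw [pvAlt, pv_rep_self s (h s (by simp)), ih (!b) (fun x hx => h x (by simp [hx]))]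
    cases b <;> simp

theorem pv_no_tick (l : List Char) (h : '`' ∉ l) : pvSplH l = l ∧ pvSplT l = [] := by
  induction l with
  | nil => simp [pvSplH, pvSplT]
  | cons c t ih =>
    have hc : c ≠ '`' := fun h' => h (h' ▸ List.mem_cons_self)
    have ht := ih (fun h' => h (List.mem_cons_of_mem c h'))
    rw [pvSplH, pvSplT]
    simp [hc, ht]

theorem pv_L3 (l : List Char) : pvA_fix_line l = pvB_fix_line l := by
  rw [pvB_fix_line_eq]
  unfold pvA_fix_line
  by_cases h1 : PySem.Chars.isIn ['\\', '*'] l = true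
  · by_cases h2 : PySem.Chars.isIn ['`'] l = true
    · -- both a backtick and an escaped asterisk: the character-loop case
      simp only [h1, h2, Bool.not_true, Bool.and_false, Bool.false_eq_true, if_false, if_pos rfl]
      have := pv_L1 l [] false []
      simp only [List.nil_append, Bool.false_eq_true, if_false, pvRender, List.map_nil,
        List.flatten_nil] at this
      simp [this]
    · -- no backtick in the line
      have h2f : PySem.Chars.isIn ['`'] l = false := by rwa [Bool.not_eq_true] at h2
      have hmem : '`' ∉ l := by
        intro hmem
        obtain ⟨u, v, rfl⟩ := List.append_of_mem hmem
        have : PySem.Chars.isIn ['`'] (u ++ '`' :: v) = true :=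
          (PySem.Chars.isIn_iff_infix _ _).mpr ⟨u, v, by simp⟩
        rw [h2f] at this
        exact Bool.false_ne_true this
      obtain ⟨hH, hT⟩ := pv_no_tick l hmem
      rw [hH, hT, pvK_singleton, if_pos rfl]
      simp [h1, h2f, pv_replace_eq]
  · -- no escaped asterisk in the line: nothing is replaced
    have h1f : PySem.Chars.isIn ['\\', '*'] l = false := by rwa [Bool.not_eq_true] at h1
    simp only [h1f, Bool.false_and, Bool.false_eq_true, if_false]
    have hni : ¬ ['\\', '*'] <:+: l := (PySem.Chars.isIn_eq_false_iff _ _).mp h1f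
    have hall : ∀ s ∈ pvSplH l :: pvSplT l, ¬ ['\\', '*'] <:+: s := by
      intro s hs hinf
      rcases List.mem_cons.mp hs with h' | h'
      · exact hni (hinf.trans (h' ▸ (pv_splH_prefix l).isInfix))
      · exact hni (hinf.trans (pv_splT_infix l s h'))
    rw [pvK, pv_alt_self true _ hall, pv_join_spl]

theorem pv_L2 : ∀ (ls : List (List Char)) (acc : List (List Char)) (code adm : Bool),
    (List.foldl pvA_line_step (acc, code, adm) ls).1
      = (List.foldl pvB_line_step (acc, code) ls).1 := by
  intro ls
  induction ls with
  | nil => intro acc code adm; rfl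
  | cons line t ih =>
    intro acc code adm
    simp only [List.foldl_cons]
    by_cases h1 : PySem.Chars.startswith (PySem.Chars.strip line) ['`', '`', '`'] = true
    · simp only [pvA_line_step, pvB_line_step, h1, if_pos rfl]
      exact ih _ _ _
    · rw [Bool.not_eq_true] at h1
      by_cases h2 : PySem.Chars.startswith (PySem.Chars.strip line) [':', ':', ':'] = true
      · simp only [pvA_line_step, pvB_line_step, h1, h2, Bool.or_true, if_pos rfl,
          Bool.false_eq_true, if_false]
        exact ih _ _ _
      · rw [Bool.not_eq_true] at h2
        cases code
        · simp only [pvA_line_step, pvB_line_step, h1, h2, Bool.or_false, Bool.false_eq_true,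
            if_false, pv_L3]
          exact ih _ _ _
        · simp only [pvA_line_step, pvB_line_step, h1, h2, Bool.true_or, if_pos rfl,
            Bool.false_eq_true, if_false]
          exact ih _ _ _

-- ===== VERDICT (by name: the statement is the Claim_ definition above) =====
theorem fix_escaped_asterisks_spec : Claim_equal_fix_escaped_asterisks := by
  intro content _
  unfold Spec_fix_escaped_asterisks fix_escaped_asterisks fix_escaped_asterisks_alt
  rw [pv_L2]
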